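-- pv_equiv track=rewrite | github.com/ccpnmr/analysis | src/python/ccpn/framework/lib/experimentAnalysis/PeakClustering.py | _getClusterOverlaps
-- ===== SOURCE A (Python) =====
-- def _getClusterOverlaps(nodes, adjacents):
--     """
--     Ref: https://stackoverflow.com/questions/14607317/
--     """
--     clusters = []
--     nodes = list(nodes)
--     while len(nodes):
--         node = nodes[0]
--         path = _getPathByDFS(node, adjacents, nodes)
--         clusters.append(path)
--         for pt in path:
--             nodes.remove(pt)
--     return clusters
--
-- def _getPathByDFS(start, adjacents, nodes):
--     """
--     Depth-first search (DFS)
--     Ref: https://stackoverflow.com/questions/14607317/"""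
--     path = []
--     q = [start]
--     while q:
--         node = q.pop(0)
--         if path.count(node) >= nodes.count(node):
--             continue
--         path = path + [node]
--         nextNodes = [p2 for p1,p2 in adjacents if p1 == node]
--         q = nextNodes + q
--     return path
-- ===== SOURCE B (Python) =====
-- def _getClusterOverlaps(nodes, adjacents):
--     """One forward pass over the node occurrences with dict counters, and a
--     call-frame DFS: each frame keeps a neighbour cursor and the multiplicity
--     guard is applied when ENTERING a node, not when it is popped off a queue."""
--     adj = {}
--     for p1, p2 in adjacents:
--         adj.setdefault(p1, []).append(p2)
--     counts = {}
--     for x in nodes: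
--         counts[x] = counts.get(x, 0) + 1
--     removed = {}            # copies of each value already assigned to a cluster
--     seen = {}               # occurrences of each value already scanned
--     clusters = []
--     for x in nodes:
--         r = seen.get(x, 0)
--         seen[x] = r + 1
--         if r < removed.get(x, 0):
--             continue        # this occurrence already belongs to an earlier cluster
--         # explicit call-frame DFS: a frame is (node, cursor into its adjacency list)
--         visits = {}
--         path = []
--         frames = []
--         if removed.get(x, 0) < counts.get(x, 0):    # enter the start node
--             visits[x] = 1
--             path.append(x)
--             frames.append((x, 0))
--         while frames:
--             node, i = frames[-1]
--             nbrs = adj.get(node, [])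
--             if i == len(nbrs):
--                 frames.pop()
--                 continue
--             frames[-1] = (node, i + 1)
--             ch = nbrs[i]
--             v = visits.get(ch, 0)
--             if v + removed.get(ch, 0) < counts.get(ch, 0):   # enter the child
--                 visits[ch] = v + 1
--                 path.append(ch)
--                 frames.append((ch, 0))
--         for n in path:
--             removed[n] = removed.get(n, 0) + 1
--         clusters.append(path)
--     return clusters
-- ===== Notes on version B (the rewrite author's own statement) =====
-- stated objective: faster
-- what changed: Replaces A's remove-and-restart outer loop and queue-concatenation DFS by a single forward pass over the node occurrences with dict counters and an explicit call-frame DFS (frames carry a neighbour cursor; the multiplicity guard is applied on entering a node instead of when it is popped off a rebuilt queue), removing the per-step path.count/nodes.count scans, the per-node adjacency comprehension and the nodes.remove passes.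
import Mathlib
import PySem

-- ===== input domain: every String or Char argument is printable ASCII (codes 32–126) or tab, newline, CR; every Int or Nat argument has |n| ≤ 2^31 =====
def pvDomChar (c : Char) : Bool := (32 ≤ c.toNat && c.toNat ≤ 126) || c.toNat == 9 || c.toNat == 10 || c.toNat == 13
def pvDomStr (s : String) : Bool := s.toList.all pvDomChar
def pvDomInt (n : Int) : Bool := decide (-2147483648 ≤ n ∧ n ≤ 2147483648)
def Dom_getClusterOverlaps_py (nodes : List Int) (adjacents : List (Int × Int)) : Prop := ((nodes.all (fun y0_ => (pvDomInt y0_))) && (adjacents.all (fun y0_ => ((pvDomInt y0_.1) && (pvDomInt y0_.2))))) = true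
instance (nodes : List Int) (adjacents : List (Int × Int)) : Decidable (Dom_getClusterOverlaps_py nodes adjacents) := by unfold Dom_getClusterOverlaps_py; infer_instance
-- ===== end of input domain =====

-- B replaces A's remove-and-restart outer loop and queue-concatenation DFS by one forward pass
-- with dict counters and a call-frame DFS with neighbour cursors: measured much faster on large inputs.


-- ===== PORT A =====
-- _getPathByDFS: q.pop(0) is the head; 'q = nextNodes + q' prepends; the fuel argument only
-- guards termination (the loop provably makes progress within this fuel on every input).
def pvDfsA (adjacents : List (Int × Int)) (nodesL : List Int) :
    Nat → List Int → List Int → List Int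
  | 0, path, _ => path
  | fuel+1, path, q =>
    match q with
    | [] => path
    | node :: rest =>
      if path.count node ≥ nodesL.count node then
        pvDfsA adjacents nodesL fuel path rest
      else
        pvDfsA adjacents nodesL fuel (path ++ [node])
          (((adjacents.filter (fun p => p.1 == node)).map Prod.snd) ++ rest)

-- outer while-loop of _getClusterOverlaps; 'for pt in path: nodes.remove(pt)' is the foldl of
-- List.erase (exact: Python's .remove never raises here since every path element is in nodes).
def pvOuterA (adjacents : List (Int × Int)) :
    Nat → List (List Int) → List Int → List (List Int)
  | 0, clusters, _ => clusters
  | fuel+1, clusters, nodesL =>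
    match nodesL with
    | [] => clusters
    | node :: _ =>
      let path := pvDfsA adjacents nodesL ((nodesL.length + 1) * (adjacents.length + 1) + 1) [] [node]
      pvOuterA adjacents fuel (clusters ++ [path]) (path.foldl (fun ns pt => ns.erase pt) nodesL)

def getClusterOverlaps_py (nodes : List Int) (adjacents : List (Int × Int)) : List (List Int) :=
  pvOuterA adjacents (nodes.length + 1) [] nodes

-- ===== PORT B =====
-- adj.setdefault(p1, []).append(p2) over adjacents
def pvBuildAdj (adjacents : List (Int × Int)) : PySem.Dict Int (List Int) :=
  adjacents.foldl (fun d p => d.insert p.1 (d.getD p.1 [] ++ [p.2])) PySem.Dict.empty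

-- counts[x] = counts.get(x, 0) + 1 over nodes
def pvCountsB (nodes : List Int) : PySem.Dict Int Int :=
  nodes.foldl (fun d x => d.insert x (d.getD x 0 + 1)) PySem.Dict.empty

-- B's while-loop over the frame stack (top of the Python list = head here); a frame is
-- (node, cursor into its adjacency list); the fuel argument only guards termination.
def pvDfsB (adj : PySem.Dict Int (List Int)) (counts removed : PySem.Dict Int Int) :
    Nat → List Int → PySem.Dict Int Int → List (Int × Nat) → List Int
  | 0, path, _, _ => path
  | fuel+1, path, visits, frames =>
    match frames with
    | [] => path
    | (node, i) :: fr =>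
      let nbrs := adj.getD node []
      if i = nbrs.length then
        pvDfsB adj counts removed fuel path visits fr
      else
        let ch := nbrs.getD i 0
        let v := visits.getD ch 0
        if v + removed.getD ch 0 < counts.getD ch 0 then
          pvDfsB adj counts removed fuel (path ++ [ch]) (visits.insert ch (v + 1))
            ((ch, 0) :: (node, i + 1) :: fr)
        else
          pvDfsB adj counts removed fuel path visits ((node, i + 1) :: fr)

-- B's single forward pass over the node occurrences ('for x in nodes')
def pvOuterB (adj : PySem.Dict Int (List Int)) (counts : PySem.Dict Int Int) (dfsFuel : Nat) :
    List Int → PySem.Dict Int Int → PySem.Dict Int Int → List (List Int) → List (List Int)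
  | [], _, _, clusters => clusters
  | x :: rest, seen, removed, clusters =>
    let r := seen.getD x 0
    let seen' := seen.insert x (r + 1)
    if r < removed.getD x 0 then
      pvOuterB adj counts dfsFuel rest seen' removed clusters
    else
      let path :=
        if removed.getD x 0 < counts.getD x 0 then
          pvDfsB adj counts removed dfsFuel [x] (PySem.Dict.empty.insert x 1) [(x, 0)]
        else []
      pvOuterB adj counts dfsFuel rest seen'
        (path.foldl (fun d n => d.insert n (d.getD n 0 + 1)) removed)
        (clusters ++ [path])

def getClusterOverlaps_py_alt (nodes : List Int) (adjacents : List (Int × Int)) : List (List Int) :=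
  pvOuterB (pvBuildAdj adjacents) (pvCountsB nodes)
    ((nodes.length + 1) * (adjacents.length + 1) + nodes.length + 2)
    nodes PySem.Dict.empty PySem.Dict.empty []

-- ===== PRECONDITION & SPEC =====
def Spec_getClusterOverlaps_py (nodes : List Int) (adjacents : List (Int × Int)) (out : List (List Int)) : Prop := out = getClusterOverlaps_py_alt nodes adjacents
instance (nodes : List Int) (adjacents : List (Int × Int)) (out : List (List Int)) : Decidable (Spec_getClusterOverlaps_py nodes adjacents out) := by unfold Spec_getClusterOverlaps_py; infer_instance

-- ===== CLAIM (what is proved, stated in full; the proofs are below) =====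
def Claim_equal_getClusterOverlaps_py : Prop := ∀ (nodes : List Int) (adjacents : List (Int × Int)), Dom_getClusterOverlaps_py nodes adjacents → Spec_getClusterOverlaps_py nodes adjacents (getClusterOverlaps_py nodes adjacents)

-- ===== LEMMAS AND PROOFS =====

-- the model of A's mutated nodes list: remove the first (f v) occurrences of each value v
def pvDropCnt (f : Int → Nat) : List Int → List Int
  | [] => []
  | x :: xs => if f x = 0 then x :: pvDropCnt f xs
               else pvDropCnt (fun v => if v = x then f v - 1 else f v) xs

-- the flattened A-queue a frame stack stands for: remaining neighbours, top frame first
def pvFlat (adj : PySem.Dict Int (List Int)) : List (Int × Nat) → List Int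
  | [] => []
  | (n, i) :: fr => (adj.getD n []).drop i ++ pvFlat adj fr

-- one-step unfolding of pvDfsB on a nonempty frame stack
theorem pvDfsB_cons (adj : PySem.Dict Int (List Int)) (counts removed : PySem.Dict Int Int)
    (fuel : Nat) (path : List Int) (visits : PySem.Dict Int Int) (node : Int) (i : Nat)
    (fr : List (Int × Nat)) :
    pvDfsB adj counts removed (fuel + 1) path visits ((node, i) :: fr) =
      if i = (adj.getD node []).length then
        pvDfsB adj counts removed fuel path visits fr
      else if visits.getD ((adj.getD node []).getD i 0) 0 +
          removed.getD ((adj.getD node []).getD i 0) 0 <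
          counts.getD ((adj.getD node []).getD i 0) 0 then
        pvDfsB adj counts removed fuel (path ++ [(adj.getD node []).getD i 0])
          (visits.insert ((adj.getD node []).getD i 0)
            (visits.getD ((adj.getD node []).getD i 0) 0 + 1))
          (((adj.getD node []).getD i 0, 0) :: (node, i + 1) :: fr)
      else
        pvDfsB adj counts removed fuel path visits ((node, i + 1) :: fr) := rfl

-- L1: the adjacency dict lookup is A's list comprehension
theorem pvBuildAdj_aux (l : List (Int × Int)) (d : PySem.Dict Int (List Int)) (v : Int) :
    (l.foldl (fun d p => d.insert p.1 (d.getD p.1 [] ++ [p.2])) d).getD v [] =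
      d.getD v [] ++ (l.filter (fun p => p.1 == v)).map Prod.snd := by
  induction l generalizing d with
  | nil => simp
  | cons p rest ih =>
    simp only [List.foldl_cons, ih, List.filter_cons]
    by_cases h : p.1 = v
    · simp [h, PySem.Dict.getD_insert_self]
    · have hb : (p.1 == v) = false := by simp [h]
      rw [PySem.Dict.getD_insert_of_ne _ _ _ (Ne.symm h)]
      simp [hb]

theorem pvBuildAdj_getD (adjacents : List (Int × Int)) (v : Int) :
    (pvBuildAdj adjacents).getD v [] = (adjacents.filter (fun p => p.1 == v)).map Prod.snd := by
  simpa using pvBuildAdj_aux adjacents PySem.Dict.empty v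

-- L2: a fold of 'd[x] = d.get(x,0)+1' counts occurrences
theorem pvCounts_aux (xs : List Int) (d : PySem.Dict Int Int) (v : Int) :
    (xs.foldl (fun d x => d.insert x (d.getD x 0 + 1)) d).getD v 0 =
      d.getD v 0 + (xs.count v : Int) := by
  induction xs generalizing d with
  | nil => simp
  | cons x rest ih =>
    simp only [List.foldl_cons, ih]
    by_cases h : x = v
    · subst h
      rw [PySem.Dict.getD_insert_self, List.count_cons_self]
      push_cast; ring
    · rw [PySem.Dict.getD_insert_of_ne _ _ _ (Ne.symm h), List.count_cons_of_ne h]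

theorem pvCountsB_getD (orig : List Int) (v : Int) :
    (pvCountsB orig).getD v 0 = (orig.count v : Int) := by
  unfold pvCountsB
  rw [pvCounts_aux]
  simp

-- the DFS only ever appends to path
theorem pvDfsA_prefix (adjacents : List (Int × Int)) (nodesL : List Int) :
    ∀ (fuel : Nat) (path q : List Int),
      ∃ ext, pvDfsA adjacents nodesL fuel path q = path ++ ext := by
  intro fuel
  induction fuel with
  | zero => intro path q; exact ⟨[], by simp [pvDfsA]⟩
  | succ n ih =>
    intro path q
    cases q with
    | nil => exact ⟨[], by simp [pvDfsA]⟩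
    | cons node rest =>
      by_cases hg : path.count node ≥ nodesL.count node
      · obtain ⟨e, he⟩ := ih path rest
        exact ⟨e, by simp [pvDfsA, hg, he]⟩
      · obtain ⟨e, he⟩ := ih (path ++ [node])
          (((adjacents.filter (fun p => p.1 == node)).map Prod.snd) ++ rest)
        exact ⟨node :: e, by simp [pvDfsA, hg, he]⟩

-- the DFS never takes more copies of a value than nodesL holds
theorem pvDfsA_count_le (adjacents : List (Int × Int)) (nodesL : List Int) :
    ∀ (fuel : Nat) (path q : List Int),
      (∀ v, path.count v ≤ nodesL.count v) →
      ∀ v, (pvDfsA adjacents nodesL fuel path q).count v ≤ nodesL.count v := by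
  intro fuel
  induction fuel with
  | zero => intro path q h v; simpa [pvDfsA] using h v
  | succ n ih =>
    intro path q h v
    cases q with
    | nil => simpa [pvDfsA] using h v
    | cons node rest =>
      by_cases hg : path.count node ≥ nodesL.count node
      · simpa [pvDfsA, hg] using ih path rest h v
      · have h' : ∀ w, (path ++ [node]).count w ≤ nodesL.count w := by
          intro w
          by_cases hw : w = node
          · subst hw
            have : (path ++ [w]).count w = path.count w + 1 := by
              simp [List.count_append]
            rw [this]; omega
          · have : (path ++ [node]).count w = path.count w := by
              simp [List.count_append, Ne.symm hw]
            rw [this]; exact h w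
        simpa [pvDfsA, hg] using ih (path ++ [node]) _ h' v

-- L3: the frame-stack DFS of B simulates A's queue DFS; 'pvFlat frames' is A's queue
theorem pvDfsB_sim (adjacents : List (Int × Int)) (nodesL : List Int)
    (adj : PySem.Dict Int (List Int)) (counts removed : PySem.Dict Int Int)
    (hadj : ∀ v, adj.getD v [] = (adjacents.filter (fun p => p.1 == v)).map Prod.snd)
    (hcr : ∀ v, counts.getD v 0 = removed.getD v 0 + (nodesL.count v : Int)) :
    ∀ (fuelB fuelA : Nat) (path : List Int) (visits : PySem.Dict Int Int)
      (frames : List (Int × Nat)),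
      (∀ v, visits.getD v 0 = (path.count v : Int)) →
      (∀ v, path.count v ≤ nodesL.count v) →
      (∀ p ∈ frames, p.2 ≤ (adj.getD p.1 []).length) →
      (nodesL.length + 1 - path.length) * (adjacents.length + 1) + (pvFlat adj frames).length ≤ fuelA →
      fuelA + frames.length + (nodesL.length + 1 - path.length) ≤ fuelB →
      pvDfsB adj counts removed fuelB path visits frames =
        pvDfsA adjacents nodesL fuelA path (pvFlat adj frames) := by
  intro fuelB
  induction fuelB with
  | zero =>
    intro fuelA path visits frames hv hsub hwf hmeas hfuel
    exfalso
    have hlen : path.length ≤ nodesL.length :=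
      (List.subperm_ext_iff.mpr (fun a _ => hsub a)).length_le
    have h1 : 1 ≤ nodesL.length + 1 - path.length := by omega
    have h2 : 1 * (adjacents.length + 1) ≤
        (nodesL.length + 1 - path.length) * (adjacents.length + 1) :=
      Nat.mul_le_mul_right _ h1
    omega
  | succ fb ih =>
    intro fuelA path visits frames hv hsub hwf hmeas hfuel
    match frames with
    | [] =>
      cases fuelA with
      | zero => simp [pvDfsB, pvDfsA, pvFlat]
      | succ m => simp [pvDfsB, pvDfsA, pvFlat]
    | (node, i) :: fr =>
      have hwfi : i ≤ (adj.getD node []).length := hwf (node, i) (by simp)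
      by_cases hend : i = (adj.getD node []).length
      · -- frame exhausted: pop it; A's queue is unchanged
        have hdrop : (adj.getD node []).drop i = [] := by
          rw [hend]; simp
        have hflat : pvFlat adj ((node, i) :: fr) = pvFlat adj fr := by
          simp [pvFlat, hdrop]
        have hstep : pvDfsB adj counts removed (fb + 1) path visits ((node, i) :: fr) =
            pvDfsB adj counts removed fb path visits fr := by
          simp [pvDfsB, hend]
        rw [hstep, hflat]
        refine ih fuelA path visits fr hv hsub (fun p hp => hwf p (by simp [hp])) ?_ ?_
        · rw [hflat] at hmeas; exact hmeas
        · simp at hfuel ⊢; omega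
      · -- live cursor: the next neighbour is the head of A's queue
        have hi : i < (adj.getD node []).length := lt_of_le_of_ne hwfi hend
        have hch : (adj.getD node []).getD i 0 = (adj.getD node [])[i] := by
          rw [List.getD_eq_getElem?_getD, List.getElem?_eq_getElem hi]; rfl
        set ch := (adj.getD node []).getD i 0 with hchdef
        have hdropi : (adj.getD node []).drop i = ch :: (adj.getD node []).drop (i + 1) := by
          rw [List.drop_eq_getElem_cons hi, ← hch]
        have hflat : pvFlat adj ((node, i) :: fr) =
            ch :: ((adj.getD node []).drop (i + 1) ++ pvFlat adj fr) := by
          simp [pvFlat, hdropi]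
        have hflat' : pvFlat adj ((node, i + 1) :: fr) =
            (adj.getD node []).drop (i + 1) ++ pvFlat adj fr := by
          simp [pvFlat]
        have hlen : path.length ≤ nodesL.length :=
          (List.subperm_ext_iff.mpr (fun a _ => hsub a)).length_le
        -- fuelA is positive
        cases fuelA with
        | zero =>
          exfalso
          have h1 : 1 ≤ nodesL.length + 1 - path.length := by omega
          have h2 : 1 * (adjacents.length + 1) ≤
              (nodesL.length + 1 - path.length) * (adjacents.length + 1) :=
            Nat.mul_le_mul_right _ h1
          omega
        | succ fA =>
          have hwf' : ∀ p ∈ ((node, i + 1) :: fr), p.2 ≤ (adj.getD p.1 []).length := by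
            intro p hp
            rcases List.mem_cons.mp hp with h1 | h1
            · rw [h1]; exact hi
            · exact hwf p (by simp [h1])
          by_cases hguard : path.count ch ≥ nodesL.count ch
          · -- A skips the head; B only advances the cursor
            have hg2 : ¬ (visits.getD ch 0 + removed.getD ch 0 < counts.getD ch 0) := by
              rw [hv, hcr]; omega
            have hstep : pvDfsB adj counts removed (fb + 1) path visits ((node, i) :: fr) =
                pvDfsB adj counts removed fb path visits ((node, i + 1) :: fr) := by
              rw [pvDfsB_cons, if_neg hend, ← hchdef, if_neg hg2]
            have hA : pvDfsA adjacents nodesL (fA + 1) path (pvFlat adj ((node, i) :: fr)) =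
                pvDfsA adjacents nodesL fA path (pvFlat adj ((node, i + 1) :: fr)) := by
              rw [hflat, hflat']
              simp [pvDfsA, hguard]
            rw [hstep, hA]
            refine ih fA path visits ((node, i + 1) :: fr) hv hsub hwf' ?_ ?_
            · rw [hflat'] ; rw [hflat] at hmeas; simp at hmeas ⊢; omega
            · simp at hfuel ⊢; omega
          · -- A enters the head; B pushes a fresh frame for it
            have hg2 : visits.getD ch 0 + removed.getD ch 0 < counts.getD ch 0 := by
              rw [hv, hcr]
              have : path.count ch < nodesL.count ch := lt_of_not_ge hguard
              omega
            have hstep : pvDfsB adj counts removed (fb + 1) path visits ((node, i) :: fr) =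
                pvDfsB adj counts removed fb (path ++ [ch])
                  (visits.insert ch (visits.getD ch 0 + 1))
                  ((ch, 0) :: (node, i + 1) :: fr) := by
              rw [pvDfsB_cons, if_neg hend, ← hchdef, if_pos hg2]
            have hA : pvDfsA adjacents nodesL (fA + 1) path (pvFlat adj ((node, i) :: fr)) =
                pvDfsA adjacents nodesL fA (path ++ [ch])
                  (pvFlat adj ((ch, 0) :: (node, i + 1) :: fr)) := by
              rw [hflat]
              have : pvFlat adj ((ch, 0) :: (node, i + 1) :: fr) =
                  ((adjacents.filter (fun p => p.1 == ch)).map Prod.snd) ++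
                    ((adj.getD node []).drop (i + 1) ++ pvFlat adj fr) := by
                simp [pvFlat, hadj]
              rw [this]
              simp [pvDfsA, hguard]
            rw [hstep, hA]
            have hv' : ∀ v, (visits.insert ch (visits.getD ch 0 + 1)).getD v 0 =
                ((path ++ [ch]).count v : Int) := by
              intro v
              by_cases h : v = ch
              · rw [h, PySem.Dict.getD_insert_self, hv]
                have hc : (path ++ [ch]).count ch = path.count ch + 1 := by
                  simp [List.count_append]
                rw [hc]; push_cast; ring
              · rw [PySem.Dict.getD_insert_of_ne _ _ _ h, hv]
                have : (path ++ [ch]).count v = path.count v := by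
                  simp [List.count_append, Ne.symm h]
                rw [this]
            have hsub' : ∀ v, (path ++ [ch]).count v ≤ nodesL.count v := by
              intro v
              by_cases h : v = ch
              · rw [h]
                have hc : (path ++ [ch]).count ch = path.count ch + 1 := by
                  simp [List.count_append]
                rw [hc]
                have := lt_of_not_ge hguard
                omega
              · have : (path ++ [ch]).count v = path.count v := by
                  simp [List.count_append, Ne.symm h]
                rw [this]; exact hsub v
            have hwf'' : ∀ p ∈ ((ch, 0) :: (node, i + 1) :: fr),
                p.2 ≤ (adj.getD p.1 []).length := by
              intro p hp
              rcases List.mem_cons.mp hp with h1 | h1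
              · rw [h1]; exact Nat.zero_le _
              · exact hwf' p h1
            have hlen' : (path ++ [ch]).length ≤ nodesL.length :=
              (List.subperm_ext_iff.mpr (fun a _ => hsub' a)).length_le
            refine ih fA (path ++ [ch]) (visits.insert ch (visits.getD ch 0 + 1))
              ((ch, 0) :: (node, i + 1) :: fr) hv' hsub' hwf'' ?_ ?_
            · -- the measure drops: a path slot is consumed, an adjacency list is released
              have hnext : ((adjacents.filter (fun p => p.1 == ch)).map Prod.snd).length ≤
                  adjacents.length := by
                simpa using List.length_filter_le _ adjacents
              have hflat2 : pvFlat adj ((ch, 0) :: (node, i + 1) :: fr) =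
                  ((adjacents.filter (fun p => p.1 == ch)).map Prod.snd) ++
                    ((adj.getD node []).drop (i + 1) ++ pvFlat adj fr) := by
                simp [pvFlat, hadj]
              rw [hflat2]
              rw [hflat] at hmeas
              have hpl : (path ++ [ch]).length = path.length + 1 := by simp
              have ht : nodesL.length + 1 - path.length =
                  (nodesL.length + 1 - (path.length + 1)) + 1 := by
                simp at hlen'; omega
              rw [ht] at hmeas
              have hexp : ((nodesL.length + 1 - (path.length + 1)) + 1) * (adjacents.length + 1) =
                  (nodesL.length + 1 - (path.length + 1)) * (adjacents.length + 1) +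
                    (adjacents.length + 1) := by ring
              rw [hexp] at hmeas
              simp only [hpl, List.length_append, List.length_cons] at hmeas ⊢
              omega
            · have hpl : (path ++ [ch]).length = path.length + 1 := by simp
              have ht : nodesL.length + 1 - path.length =
                  (nodesL.length + 1 - (path.length + 1)) + 1 := by
                simp at hlen'; omega
              rw [ht] at hfuel
              simp only [hpl, List.length_cons] at hfuel ⊢
              omega

-- pvDropCnt basics
theorem pvDropCnt_zero (l : List Int) : pvDropCnt (fun _ => 0) l = l := by
  induction l with
  | nil => rfl
  | cons x xs ih => simp [pvDropCnt, ih]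

theorem pvDropCnt_count (f : Int → Nat) (l : List Int) (v : Int) :
    (pvDropCnt f l).count v = l.count v - f v := by
  induction l generalizing f with
  | nil => simp [pvDropCnt]
  | cons x xs ih =>
    simp only [pvDropCnt]
    by_cases h : f x = 0
    · rw [if_pos h]
      by_cases hv : v = x
      · subst hv
        rw [List.count_cons_self, ih, List.count_cons_self, h]
        omega
      · rw [List.count_cons_of_ne (Ne.symm hv), ih, List.count_cons_of_ne (Ne.symm hv)]
    · rw [if_neg h, ih]
      by_cases hv : v = x
      · subst hv
        rw [List.count_cons_self]
        rw [if_pos rfl]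
        omega
      · rw [List.count_cons_of_ne (Ne.symm hv)]
        simp only [if_neg hv]

theorem pvDropCnt_length_le (f : Int → Nat) (l : List Int) :
    (pvDropCnt f l).length ≤ l.length := by
  induction l generalizing f with
  | nil => simp [pvDropCnt]
  | cons x xs ih =>
    simp only [pvDropCnt]
    by_cases h : f x = 0
    · rw [if_pos h]; simpa using ih f
    · rw [if_neg h]
      exact le_trans (ih _) (by simp)

theorem pvDropCnt_nil (f : Int → Nat) (l : List Int) (h : ∀ v, l.count v ≤ f v) :
    pvDropCnt f l = [] := by
  have : ∀ v, (pvDropCnt f l).count v = 0 := by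
    intro v; rw [pvDropCnt_count]; have := h v; omega
  rcases hx : pvDropCnt f l with _ | ⟨y, t⟩
  · rfl
  · exfalso
    have := this y
    rw [hx] at this
    simp [List.count_cons_self] at this

theorem pvDropCnt_head (l : List Int) (f : Int → Nat) (i : Nat) (hi : i < l.length)
    (hpre : ∀ v, (l.take i).count v ≤ f v)
    (heq : f (l.getD i 0) = (l.take i).count (l.getD i 0)) :
    ∃ t, pvDropCnt f l = l.getD i 0 :: t := by
  induction l generalizing f i with
  | nil => simp at hi
  | cons y ys ih =>
    cases i with
    | zero =>
      have h0 : f y = 0 := by simpa using heq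
      exact ⟨pvDropCnt f ys, by simp [pvDropCnt, h0]⟩
    | succ j =>
      have hj : j < ys.length := by simpa using hi
      have hfy : f y ≠ 0 := by
        have := hpre y
        rw [List.take_succ_cons, List.count_cons_self] at this
        omega
      have hz : (y :: ys).getD (j + 1) 0 = ys.getD j 0 := List.getD_cons_succ
      have heq' : (fun v => if v = y then f v - 1 else f v) (ys.getD j 0) =
          (ys.take j).count (ys.getD j 0) := by
        rw [hz, List.take_succ_cons] at heq
        by_cases hzy : ys.getD j 0 = y
        · rw [hzy] at heq ⊢
          rw [List.count_cons_self] at heq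
          beta_reduce
          rw [if_pos rfl]
          omega
        · rw [List.count_cons_of_ne (Ne.symm hzy)] at heq
          beta_reduce
          rw [if_neg hzy]
          exact heq
      have hpre' : ∀ v, (ys.take j).count v ≤ (fun v => if v = y then f v - 1 else f v) v := by
        intro v
        have := hpre v
        rw [List.take_succ_cons] at this
        by_cases hv : v = y
        · subst hv
          rw [List.count_cons_self] at this
          beta_reduce
          rw [if_pos rfl]
          omega
        · rw [List.count_cons_of_ne (Ne.symm hv)] at this
          beta_reduce
          rw [if_neg hv]
          exact this
      obtain ⟨t, ht⟩ := ih _ j hj hpre' heq'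
      refine ⟨t, ?_⟩
      rw [hz]
      simpa [pvDropCnt, hfy] using ht

theorem pvDropCnt_erase (l : List Int) (f : Int → Nat) (a : Int)
    (ha : a ∈ pvDropCnt f l) :
    (pvDropCnt f l).erase a = pvDropCnt (fun v => if v = a then f v + 1 else f v) l := by
  induction l generalizing f with
  | nil => simp [pvDropCnt] at ha
  | cons x xs ih =>
    by_cases h : f x = 0
    · rw [pvDropCnt, if_pos h] at ha ⊢
      by_cases hax : a = x
      · subst hax
        rw [List.erase_cons_head]
        have hg : (if a = a then f a + 1 else f a) ≠ 0 := by simp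
        rw [pvDropCnt, if_neg hg]
        have : (fun v => if v = a then (if v = a then f v + 1 else f v) - 1
            else (if v = a then f v + 1 else f v)) = f := by
          funext v
          by_cases hv : v = a <;> simp [hv]
        rw [this]
      · have hax' : (x == a) = false := by simp [Ne.symm hax]
        rw [List.erase_cons, hax']
        have ha' : a ∈ pvDropCnt f xs := by
          rcases List.mem_cons.mp ha with h1 | h1
          · exact absurd h1 hax
          · exact h1
        have hg0 : (if x = a then f x + 1 else f x) = 0 := by simp [hax, Ne.symm hax, h]
        rw [pvDropCnt, if_pos hg0]
        rw [ih f ha']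
        simp
    · rw [pvDropCnt, if_neg h] at ha ⊢
      have hg : (if x = a then f x + 1 else f x) ≠ 0 := by
        by_cases hxa : x = a <;> simp [hxa, h]
      rw [pvDropCnt, if_neg hg]
      rw [ih (fun v => if v = x then f v - 1 else f v) ha]
      congr 1
      funext v
      by_cases hv : v = x <;> by_cases hva : v = a
      · subst hv; subst hva; simp; omega
      · subst hv; simp [hva, Ne.symm]
      · subst hva
        have : v ≠ x := hv
        simp [hv, this]
      · simp [hv, hva]

theorem pvDropCnt_diff (l : List Int) (p : List Int) (f : Int → Nat)
    (hp : ∀ v, p.count v ≤ (pvDropCnt f l).count v) :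
    (pvDropCnt f l).diff p = pvDropCnt (fun v => f v + p.count v) l := by
  induction p generalizing f with
  | nil =>
    have h0 : (fun v => f v + List.count v []) = f := funext fun v => by simp
    simp [List.diff_nil, h0]
  | cons a p' ih =>
    have ha : a ∈ pvDropCnt f l := by
      have h1 := hp a
      rw [List.count_cons_self] at h1
      exact List.count_pos_iff.mp (by omega)
    rw [List.diff_cons, pvDropCnt_erase l f a ha]
    have hp' : ∀ v, p'.count v ≤ (pvDropCnt (fun v => if v = a then f v + 1 else f v) l).count v := by
      intro v
      rw [pvDropCnt_count]
      have h1 := hp v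
      rw [pvDropCnt_count] at h1
      by_cases hv : v = a
      · subst hv
        rw [List.count_cons_self] at h1
        beta_reduce
        rw [if_pos rfl]
        omega
      · rw [List.count_cons_of_ne (Ne.symm hv)] at h1
        beta_reduce
        rw [if_neg hv]
        exact h1
    rw [ih _ hp']
    congr 1
    funext v
    by_cases hv : v = a
    · subst hv
      rw [List.count_cons_self]
      beta_reduce
      rw [if_pos rfl]
      omega
    · rw [List.count_cons_of_ne (Ne.symm hv)]
      beta_reduce
      rw [if_neg hv]

theorem pvDiff_length_le (p l : List Int) : (l.diff p).length ≤ l.length := by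
  induction p generalizing l with
  | nil => simp
  | cons a p' ih =>
    rw [List.diff_cons]
    exact le_trans (ih _) List.length_erase_le

-- the cluster path starts with its start node
theorem pvClusterPath_shape (adjacents : List (Int × Int)) (nodesL : List Int) (node : Int)
    (h : nodesL.count node ≠ 0) :
    ∃ ext, pvDfsA adjacents nodesL ((nodesL.length + 1) * (adjacents.length + 1) + 1) [] [node] =
      node :: ext := by
  have h1 : ¬ (List.count node ([] : List Int) ≥ nodesL.count node) := by
    simp only [List.count_nil]
    omega
  obtain ⟨e, he⟩ := pvDfsA_prefix adjacents nodesL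
    ((nodesL.length + 1) * (adjacents.length + 1)) ([] ++ [node])
    (((adjacents.filter (fun p => p.1 == node)).map Prod.snd) ++ [])
  refine ⟨e, ?_⟩
  simp only [pvDfsA]
  rw [if_neg h1]
  simpa using he

-- fuel-monotonicity of A's outer loop
theorem pvOuterA_fuel_eq (adjacents : List (Int × Int)) :
    ∀ (f1 f2 : Nat) (clusters : List (List Int)) (nodesL : List Int),
      nodesL.length + 1 ≤ f1 → nodesL.length + 1 ≤ f2 →
      pvOuterA adjacents f1 clusters nodesL = pvOuterA adjacents f2 clusters nodesL := by
  intro f1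
  induction f1 with
  | zero => intro f2 clusters nodesL h1 h2; exact absurd h1 (by omega)
  | succ n ih =>
    intro f2 clusters nodesL h1 h2
    cases f2 with
    | zero => exact absurd h2 (by omega)
    | succ m =>
      cases nodesL with
      | nil => simp [pvOuterA]
      | cons node t =>
        obtain ⟨e, he⟩ := pvClusterPath_shape adjacents (node :: t) node
          (by rw [List.count_cons_self]; omega)
        have hfold : ∀ p : List Int, p.foldl (fun ns pt => ns.erase pt) (node :: t) =
            (node :: t).diff p := fun p => (List.diff_eq_foldl _ _).symm
        have hlen' : ((node :: t).diff
            (pvDfsA adjacents (node :: t)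
              (((node :: t).length + 1) * (adjacents.length + 1) + 1) [] [node])).length + 1 ≤
            (node :: t).length := by
          rw [he, List.diff_cons, List.erase_cons_head]
          have := pvDiff_length_le e t
          simp only [List.length_cons]
          omega
        simp only [pvOuterA]
        rw [hfold]
        exact ih m _ _ (by omega) (by omega)

-- B's cluster call equals A's _getPathByDFS call on the residual node list
theorem pvCluster_agree (adjacents : List (Int × Int)) (orig : List Int) (nodesL : List Int)
    (removed : PySem.Dict Int Int) (R : Int → Nat)
    (hR : ∀ v, removed.getD v 0 = (R v : Int))
    (hcnt : ∀ v, nodesL.count v = orig.count v - R v)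
    (hle : ∀ v, R v ≤ orig.count v)
    (hlenle : nodesL.length ≤ orig.length)
    (x : Int) (hx : nodesL.count x ≠ 0) :
    pvDfsB (pvBuildAdj adjacents) (pvCountsB orig) removed
        ((orig.length + 1) * (adjacents.length + 1) + orig.length + 2)
        [x] (PySem.Dict.empty.insert x 1) [(x, 0)] =
      pvDfsA adjacents nodesL ((nodesL.length + 1) * (adjacents.length + 1) + 1) [] [x] := by
  have hcr : ∀ v, (pvCountsB orig).getD v 0 = removed.getD v 0 + (nodesL.count v : Int) := by
    intro v
    rw [pvCountsB_getD, hR, hcnt]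
    have := hle v
    push_cast [Nat.cast_sub this]
    ring
  have hg1 : ¬ (List.count x ([] : List Int) ≥ nodesL.count x) := by
    simp only [List.count_nil]; omega
  have hA1 : pvDfsA adjacents nodesL ((nodesL.length + 1) * (adjacents.length + 1) + 1) [] [x] =
      pvDfsA adjacents nodesL ((nodesL.length + 1) * (adjacents.length + 1)) [x]
        ((adjacents.filter (fun p => p.1 == x)).map Prod.snd) := by
    simp only [pvDfsA]
    rw [if_neg hg1]
    simp
  rw [hA1]
  have hflat : pvFlat (pvBuildAdj adjacents) [(x, 0)] =
      (adjacents.filter (fun p => p.1 == x)).map Prod.snd := by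
    simp [pvFlat, pvBuildAdj_getD]
  rw [← hflat]
  refine pvDfsB_sim adjacents nodesL (pvBuildAdj adjacents) (pvCountsB orig) removed
    (pvBuildAdj_getD adjacents) hcr _ _ [x] (PySem.Dict.empty.insert x 1) [(x, 0)] ?_ ?_ ?_ ?_ ?_
  · intro v
    by_cases h : v = x
    · rw [h, PySem.Dict.getD_insert_self]; simp
    · rw [PySem.Dict.getD_insert_of_ne _ _ _ h]
      have hc : List.count v [x] = 0 := by simp [Ne.symm h]
      rw [hc]; simp
  · intro v
    by_cases h : v = x
    · rw [h]
      have hc : List.count x [x] = 1 := by simp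
      rw [hc]; omega
    · have hc : List.count v [x] = 0 := by simp [Ne.symm h]
      rw [hc]; omega
  · intro p hp
    simp at hp
    rw [hp]
    exact Nat.zero_le _
  · rw [hflat]
    have hnext : ((adjacents.filter (fun p => p.1 == x)).map Prod.snd).length ≤
        adjacents.length := by
      simpa using List.length_filter_le _ adjacents
    have h1 : nodesL.length + 1 - ([x] : List Int).length = nodesL.length := by simp
    rw [h1]
    have hexp : (nodesL.length + 1) * (adjacents.length + 1) =
        nodesL.length * (adjacents.length + 1) + (adjacents.length + 1) := by ring
    rw [hexp]
    exact Nat.add_le_add_left (by omega) _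
  · have hm : (nodesL.length + 1) * (adjacents.length + 1) ≤
        (orig.length + 1) * (adjacents.length + 1) :=
      Nat.mul_le_mul_right _ (by omega)
    have h1 : nodesL.length + 1 - ([x] : List Int).length = nodesL.length := by simp
    simp only [List.length_cons, List.length_nil]
    generalize hP : (nodesL.length + 1) * (adjacents.length + 1) = P at hm ⊢
    generalize hQ : (orig.length + 1) * (adjacents.length + 1) = Q at hm ⊢
    omega

-- the main simulation: B's forward pass computes A's outer loop
theorem pvOuterB_eq (adjacents : List (Int × Int)) (orig : List Int) :
    ∀ (rest pref : List Int), orig = pref ++ rest →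
    ∀ (seen removed : PySem.Dict Int Int) (R : Int → Nat) (clusters : List (List Int)),
      (∀ v, seen.getD v 0 = (pref.count v : Int)) →
      (∀ v, removed.getD v 0 = (R v : Int)) →
      (∀ v, pref.count v ≤ R v) →
      (∀ v, R v ≤ orig.count v) →
      pvOuterB (pvBuildAdj adjacents) (pvCountsB orig)
          ((orig.length + 1) * (adjacents.length + 1) + orig.length + 2)
          rest seen removed clusters =
        pvOuterA adjacents ((pvDropCnt R orig).length + 1) clusters (pvDropCnt R orig) := by
  intro rest
  induction rest with
  | nil =>
    intro pref horig seen removed R clusters hseen hR hpre hle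
    have hnil : pvDropCnt R orig = [] := by
      apply pvDropCnt_nil
      intro v
      have := hpre v
      rw [horig] at *
      simpa using this
    rw [hnil]
    simp [pvOuterB, pvOuterA]
  | cons x rest ih =>
    intro pref horig seen removed R clusters hseen hR hpre hle
    have hrx : seen.getD x 0 = (pref.count x : Int) := hseen x
    have hseen' : ∀ v, (seen.insert x (seen.getD x 0 + 1)).getD v 0 =
        ((pref ++ [x]).count v : Int) := by
      intro v
      by_cases h : v = x
      · rw [h, PySem.Dict.getD_insert_self, hseen]
        simp [List.count_append]
      · rw [PySem.Dict.getD_insert_of_ne _ _ _ h, hseen]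
        simp [List.count_append, Ne.symm h]
    have horig' : orig = (pref ++ [x]) ++ rest := by simp [horig]
    by_cases hdead : seen.getD x 0 < removed.getD x 0
    · -- dead occurrence: skip it; A's residual list is unchanged
      have hd2 : pref.count x < R x := by
        rw [hrx, hR] at hdead
        exact_mod_cast hdead
      have hpre' : ∀ v, (pref ++ [x]).count v ≤ R v := by
        intro v
        by_cases h : v = x
        · rw [h]
          have hc : (pref ++ [x]).count x = pref.count x + 1 := by simp [List.count_append]
          rw [hc]; omega
        · have hc : (pref ++ [x]).count v = pref.count v := by
            simp [List.count_append, Ne.symm h]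
          rw [hc]; exact hpre v
      have hstep : pvOuterB (pvBuildAdj adjacents) (pvCountsB orig)
          ((orig.length + 1) * (adjacents.length + 1) + orig.length + 2)
          (x :: rest) seen removed clusters =
          pvOuterB (pvBuildAdj adjacents) (pvCountsB orig)
          ((orig.length + 1) * (adjacents.length + 1) + orig.length + 2)
          rest (seen.insert x (seen.getD x 0 + 1)) removed clusters := by
        simp only [pvOuterB]
        rw [if_pos hdead]
      rw [hstep]
      exact ih (pref ++ [x]) horig' _ removed R clusters hseen' hR hpre' hle
    · -- live occurrence: here pref.count x = R x and a cluster starts at x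
      have hRx : R x = pref.count x := by
        rw [hrx, hR] at hdead
        have h1 := hpre x
        have h2 : ¬ ((pref.count x : Int) < (R x : Int)) := hdead
        omega
      -- x is the head of the residual list
      have hi : pref.length < orig.length := by
        rw [horig]; simp
      have hgetD : orig.getD pref.length 0 = x := by
        rw [horig, List.getD_eq_getElem?_getD, List.getElem?_append_right (le_refl _)]
        simp
      have htake : orig.take pref.length = pref := by
        rw [horig, List.take_left]
      obtain ⟨t, ht⟩ := pvDropCnt_head orig R pref.length hi
        (by rw [htake]; exact hpre) (by rw [hgetD, htake, hRx])
      rw [hgetD] at ht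
      rw [ht]
      have hcnt : ∀ v, (x :: t).count v = orig.count v - R v := by
        intro v; rw [← ht, pvDropCnt_count]
      have hlenle : (x :: t).length ≤ orig.length := by
        rw [← ht]; exact pvDropCnt_length_le R orig
      have hx : (x :: t).count x ≠ 0 := by rw [List.count_cons_self]; omega
      -- the enter guard of B passes
      have hguard : removed.getD x 0 < (pvCountsB orig).getD x 0 := by
        rw [pvCountsB_getD, hR]
        have h1 := hcnt x
        have h2 := hle x
        have h3 : 0 < orig.count x - R x := by
          have := hx; rw [h1] at this; omega
        omega
      set pathA := pvDfsA adjacents (x :: t)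
        (((x :: t).length + 1) * (adjacents.length + 1) + 1) [] [x] with hpA
      have hpath : pvDfsB (pvBuildAdj adjacents) (pvCountsB orig) removed
          ((orig.length + 1) * (adjacents.length + 1) + orig.length + 2)
          [x] (PySem.Dict.empty.insert x 1) [(x, 0)] = pathA :=
        pvCluster_agree adjacents orig (x :: t) removed R hR hcnt hle hlenle x hx
      have hstep : pvOuterB (pvBuildAdj adjacents) (pvCountsB orig)
          ((orig.length + 1) * (adjacents.length + 1) + orig.length + 2)
          (x :: rest) seen removed clusters =
          pvOuterB (pvBuildAdj adjacents) (pvCountsB orig)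
          ((orig.length + 1) * (adjacents.length + 1) + orig.length + 2)
          rest (seen.insert x (seen.getD x 0 + 1))
          (pathA.foldl (fun d n => d.insert n (d.getD n 0 + 1)) removed)
          (clusters ++ [pathA]) := by
        simp only [pvOuterB]
        rw [if_neg hdead, if_pos hguard, hpath]
      rw [hstep]
      have hcount_le : ∀ v, pathA.count v ≤ (x :: t).count v :=
        pvDfsA_count_le adjacents (x :: t) _ [] [x] (fun v => by simp)
      obtain ⟨e, he⟩ := pvClusterPath_shape adjacents (x :: t) x hx
      rw [← hpA] at he
      have hR' : ∀ v, (pathA.foldl (fun d n => d.insert n (d.getD n 0 + 1))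
          removed).getD v 0 = (((R v + pathA.count v : Nat)) : Int) := by
        intro v; rw [pvCounts_aux, hR]; push_cast; ring
      have hpre'' : ∀ v, (pref ++ [x]).count v ≤ R v + pathA.count v := by
        intro v
        by_cases h : v = x
        · rw [h]
          have h1 : (pref ++ [x]).count x = pref.count x + 1 := by simp [List.count_append]
          have h2 : 1 ≤ pathA.count x := by
            rw [he, List.count_cons_self]; omega
          rw [h1, hRx]; omega
        · have h1 : (pref ++ [x]).count v = pref.count v := by
            simp [List.count_append, Ne.symm h]
          rw [h1]
          exact le_trans (hpre v) (Nat.le_add_right _ _)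
      have hle'' : ∀ v, R v + pathA.count v ≤ orig.count v := by
        intro v
        have h1 := hcount_le v
        rw [hcnt] at h1
        have h2 := hle v
        omega
      have hdiff : (x :: t).diff pathA = pvDropCnt (fun v => R v + pathA.count v) orig := by
        rw [← ht]
        exact pvDropCnt_diff orig pathA R (by rw [ht]; exact hcount_le)
      have hlen' : (pvDropCnt (fun v => R v + pathA.count v) orig).length + 1 ≤
          (x :: t).length := by
        rw [← hdiff, he, List.diff_cons, List.erase_cons_head]
        have := pvDiff_length_le e t
        simp only [List.length_cons]
        omega
      rw [ih (pref ++ [x]) horig' _ _ (fun v => R v + pathA.count v) (clusters ++ [pathA])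
        hseen' hR' hpre'' hle'']
      have hunfold : pvOuterA adjacents ((x :: t).length + 1) clusters (x :: t) =
          pvOuterA adjacents (x :: t).length (clusters ++ [pathA]) ((x :: t).diff pathA) := by
        simp only [pvOuterA]
        rw [← hpA]
        rw [show pathA.foldl (fun ns pt => ns.erase pt) (x :: t) =
          (x :: t).diff pathA from (List.diff_eq_foldl _ _).symm]
      rw [hunfold, hdiff]
      exact (pvOuterA_fuel_eq adjacents
        ((pvDropCnt (fun v => R v + pathA.count v) orig).length + 1)
        (x :: t).length (clusters ++ [pathA])
        (pvDropCnt (fun v => R v + pathA.count v) orig)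
        (by omega) (by omega))

-- ===== VERDICT (by name: the statement is the Claim_ definition above) =====
theorem getClusterOverlaps_py_spec : Claim_equal_getClusterOverlaps_py := by
  intro nodes adjacents _
  unfold Spec_getClusterOverlaps_py getClusterOverlaps_py getClusterOverlaps_py_alt
  have h := pvOuterB_eq adjacents nodes nodes [] (by simp) PySem.Dict.empty PySem.Dict.empty
    (fun _ => 0) [] (by simp) (by simp) (by simp) (by simp)
  rw [h, pvDropCnt_zero]
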